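-- pv_equiv track=rewrite | github.com/harishragavendra1810/Pmo-agent | aiagents/pmo-agent/src/services/document_processor.py | process_email_thread
-- ===== SOURCE A (Python) =====
-- def process_email_thread(email_content: str) -> str:
--     """
--     Process email thread.
--
--     Args:
--         email_content: Raw email content
--
--     Returns:
--         Processed email content
--     """
--     # Remove email headers, signatures, etc.
--     lines = email_content.split('\n')
--     processed = []
--     skip_headers = False
--
--     for line in lines:
--         # Skip common email headers
--         if line.startswith('From:') or line.startswith('To:') or line.startswith('Date:'):
--             skip_headers = True
--             continue
--         if skip_headers and line.strip() == '':
--             skip_headers = False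
--             continue
--         if not skip_headers and line.strip():
--             processed.append(line.strip())
--
--     return '\n'.join(processed)
-- ===== SOURCE B (Python) =====
-- def process_email_thread(email_content: str) -> str:
--     # Split into blocks of consecutive non-blank lines, then take each block's
--     # stripped lines up to (not including) the first header line.
--     blocks = []
--     cur = []
--     for line in email_content.split('\n'):
--         if line.strip() == '':
--             if cur:
--                 blocks.append(cur)
--                 cur = []
--         else:
--             cur.append(line)
--     if cur:
--         blocks.append(cur)
--     out = []
--     for block in blocks:
--         for line in block:
--             if line.startswith('From:') or line.startswith('To:') or line.startswith('Date:'):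
--                 break
--             out.append(line.strip())
--     return '\n'.join(out)
-- ===== Notes on version B (the rewrite author's own statement) =====
-- stated objective: alternative
-- what changed: Replaces the carried skip_headers flag with an explicit two-phase decomposition: split the lines into blank-separated blocks, then emit each block's stripped lines up to the first header line (break), joining at the end.
import Mathlib
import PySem

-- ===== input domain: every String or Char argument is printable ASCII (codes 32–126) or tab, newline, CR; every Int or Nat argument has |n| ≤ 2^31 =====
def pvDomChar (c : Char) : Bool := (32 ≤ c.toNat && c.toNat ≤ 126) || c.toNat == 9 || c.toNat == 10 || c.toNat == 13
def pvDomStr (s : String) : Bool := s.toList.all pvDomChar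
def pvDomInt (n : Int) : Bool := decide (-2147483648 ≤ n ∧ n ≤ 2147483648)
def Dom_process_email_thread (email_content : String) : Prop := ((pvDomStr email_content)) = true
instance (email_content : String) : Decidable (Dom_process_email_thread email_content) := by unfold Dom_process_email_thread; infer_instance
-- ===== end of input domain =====

-- B replaces A's carried skip_headers flag by an explicit blank-separated-block
-- decomposition that breaks at the first header line of each block (alternative, same cost).

-- shared predicate helpers (the identical tests both Python versions perform)
def pvIsHeader (line : String) : Bool :=
  PySem.Str.startswith line "From:" || PySem.Str.startswith line "To:" || PySem.Str.startswith line "Date:"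

def pvIsBlank (line : String) : Bool := PySem.Str.strip line == ""

-- ===== PORT A =====
def process_email_thread (email_content : String) : String :=
  let lines := (PySem.Str.split? email_content "\n").getD []
  let st := lines.foldl (fun (st : List String × Bool) line =>
      if pvIsHeader line then (st.1, true)
      else if st.2 && pvIsBlank line then (st.1, false)
      else if !st.2 && !(pvIsBlank line) then (st.1 ++ [PySem.Str.strip line], st.2)
      else st) ([], false)
  PySem.Str.join "\n" st.1

-- ===== PORT B =====
-- inner 'for line in block: … break' loop of Source B
def pvTakeBlock : List String → List String
  | [] => []
  | line :: rest => if pvIsHeader line then [] else PySem.Str.strip line :: pvTakeBlock rest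

def process_email_thread_alt (email_content : String) : String :=
  let st := ((PySem.Str.split? email_content "\n").getD []).foldl
      (fun (st : List (List String) × List String) line =>
        if pvIsBlank line then (if st.2.isEmpty then st else (st.1 ++ [st.2], []))
        else (st.1, st.2 ++ [line])) ([], [])
  let blocks := if st.2.isEmpty then st.1 else st.1 ++ [st.2]
  let out := blocks.foldl (fun out block => out ++ pvTakeBlock block) []
  PySem.Str.join "\n" out

-- ===== PRECONDITION & SPEC =====
def Spec_process_email_thread (email_content : String) (out : String) : Prop := out = process_email_thread_alt email_content
instance (email_content : String) (out : String) : Decidable (Spec_process_email_thread email_content out) := by unfold Spec_process_email_thread; infer_instance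

-- ===== CLAIM (what is proved, stated in full; the proofs are below) =====
def Claim_equal_process_email_thread : Prop := ∀ (email_content : String), Dom_process_email_thread email_content → Spec_process_email_thread email_content (process_email_thread email_content)

-- ===== LEMMAS AND PROOFS =====

-- the common specification: A's loop as a direct recursion on the line list
def pvProc : Bool → List String → List String
  | _, [] => []
  | skip, l :: ls =>
    if pvIsHeader l then pvProc true ls
    else if pvIsBlank l then pvProc false ls
    else if skip then pvProc true ls
    else PySem.Str.strip l :: pvProc false ls

lemma pv_strip_ne_nil (c : Char) (t : List Char) (hc : PySem.Chars.isspace c = false) :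
    PySem.Chars.strip (c :: t) ≠ [] := by
  unfold PySem.Chars.strip PySem.Chars.rstrip PySem.Chars.lstrip
  rw [List.dropWhile_cons, hc]
  simp only [if_false, List.reverse_eq_nil_iff, ne_eq, List.dropWhile_eq_nil_iff]
  intro h
  have := h c (by simp)
  rw [hc] at this
  exact Bool.false_ne_true this

lemma pv_blank_not_header (l : String) (hb : pvIsBlank l = true) : pvIsHeader l = false := by
  by_contra h
  rw [Bool.not_eq_false] at h
  have hstrip : PySem.Chars.strip l.toList = [] := by
    have : PySem.Str.strip l = "" := by
      have := hb; unfold pvIsBlank at this; exact eq_of_beq this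
    have h2 := congrArg String.toList this
    simpa using h2
  unfold pvIsHeader at h
  rcases Bool.or_eq_true_iff.mp h with h' | hD
  · rcases Bool.or_eq_true_iff.mp h' with hF | hT
    · have hp := (PySem.Chars.startswith_iff _ _).mp (by simpa using hF)
      obtain ⟨u, hu⟩ := hp
      have : l.toList = 'F' :: ("rom:".toList ++ u) := by rw [← hu]; rfl
      rw [this] at hstrip
      exact pv_strip_ne_nil _ _ (by decide) hstrip
    · have hp := (PySem.Chars.startswith_iff _ _).mp (by simpa using hT)
      obtain ⟨u, hu⟩ := hp
      have : l.toList = 'T' :: ("o:".toList ++ u) := by rw [← hu]; rfl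
      rw [this] at hstrip
      exact pv_strip_ne_nil _ _ (by decide) hstrip
  · have hp := (PySem.Chars.startswith_iff _ _).mp (by simpa using hD)
    obtain ⟨u, hu⟩ := hp
    have : l.toList = 'D' :: ("ate:".toList ++ u) := by rw [← hu]; rfl
    rw [this] at hstrip
    exact pv_strip_ne_nil _ _ (by decide) hstrip

-- A's foldl computes pvProc
lemma pv_foldA (lines : List String) (p : List String) (skip : Bool) :
    (lines.foldl (fun (st : List String × Bool) line =>
      if pvIsHeader line then (st.1, true)
      else if st.2 && pvIsBlank line then (st.1, false)
      else if !st.2 && !(pvIsBlank line) then (st.1 ++ [PySem.Str.strip line], st.2)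
      else st) (p, skip)).1 = p ++ pvProc skip lines := by
  induction lines generalizing p skip with
  | nil => simp [pvProc]
  | cons l ls ih =>
    rw [List.foldl_cons]
    by_cases hh : pvIsHeader l = true
    · simp only [hh, if_true]
      rw [ih]
      simp [pvProc, hh]
    · rw [Bool.not_eq_true] at hh
      by_cases hb : pvIsBlank l = true
      · cases skip <;>
          simp only [hh, hb, Bool.false_eq_true, if_false, Bool.false_and, Bool.true_and,
            Bool.and_true, Bool.not_false, Bool.not_true, if_true] <;>
          rw [ih] <;> simp [pvProc, hh, hb]
      · rw [Bool.not_eq_true] at hb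
        cases skip <;>
          simp only [hh, hb, Bool.false_eq_true, if_false, Bool.false_and, Bool.true_and,
            Bool.and_false, Bool.not_false, Bool.not_true, if_true] <;>
          rw [ih] <;> simp [pvProc, hh, hb]

-- B's final assembly of the block list, as a function of the loop state
def pvFinish (st : List (List String) × List String) : List String :=
  (if st.2.isEmpty then st.1 else st.1 ++ [st.2]).flatMap pvTakeBlock

lemma pv_finish_acc (blocks : List (List String)) (st : List (List String) × List String) :
    pvFinish (blocks ++ st.1, st.2) = blocks.flatMap pvTakeBlock ++ pvFinish st := by
  unfold pvFinish
  by_cases h : st.2.isEmpty <;> simp [h, List.append_assoc]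

lemma pv_takeBlock_append (xs ys : List String) :
    pvTakeBlock (xs ++ ys) =
      if xs.any pvIsHeader then pvTakeBlock xs else xs.map PySem.Str.strip ++ pvTakeBlock ys := by
  induction xs with
  | nil => simp
  | cons x xs ih =>
    by_cases hx : pvIsHeader x = true
    · simp [pvTakeBlock, hx]
    · rw [Bool.not_eq_true] at hx
      by_cases ha : xs.any pvIsHeader = true <;>
        simp [pvTakeBlock, hx, ha, ih]

lemma pv_takeBlock_eq_map (xs : List String) (h : xs.any pvIsHeader = false) :
    pvTakeBlock xs = xs.map PySem.Str.strip := by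
  induction xs with
  | nil => rfl
  | cons x xs ih =>
    simp only [List.any_cons, Bool.or_eq_false_iff] at h
    simp [pvTakeBlock, h.1, ih h.2]

-- B's block-building foldl: the accumulated blocks only grow at the front
lemma pv_foldB_acc (lines : List String) (blocks : List (List String)) (cur : List String) :
    lines.foldl (fun (st : List (List String) × List String) line =>
        if pvIsBlank line then (if st.2.isEmpty then st else (st.1 ++ [st.2], []))
        else (st.1, st.2 ++ [line])) (blocks, cur)
      = (blocks ++ (lines.foldl (fun (st : List (List String) × List String) line =>
        if pvIsBlank line then (if st.2.isEmpty then st else (st.1 ++ [st.2], []))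
        else (st.1, st.2 ++ [line])) ([], cur)).1,
        (lines.foldl (fun (st : List (List String) × List String) line =>
        if pvIsBlank line then (if st.2.isEmpty then st else (st.1 ++ [st.2], []))
        else (st.1, st.2 ++ [line])) ([], cur)).2) := by
  induction lines generalizing blocks cur with
  | nil => simp
  | cons l ls ih =>
    simp only [List.foldl_cons]
    by_cases hb : pvIsBlank l = true
    · by_cases hc : cur.isEmpty
      · simp only [hb, if_true, hc, if_true]
        exact ih blocks cur
      · rw [Bool.not_eq_true] at hc
        simp only [hb, if_true, hc, Bool.false_eq_true, if_false]
        rw [ih (blocks ++ [cur]) [], ih ([] ++ [cur]) []]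
        simp [List.append_assoc]
    · rw [Bool.not_eq_true] at hb
      simp only [hb, Bool.false_eq_true, if_false]
      rw [ih blocks (cur ++ [l]), ih [] (cur ++ [l])]

-- main B lemma: processing from state ([], cur) yields cur's contribution then pvProc
lemma pv_mainB (lines : List String) (cur : List String) :
    pvFinish (lines.foldl (fun (st : List (List String) × List String) line =>
        if pvIsBlank line then (if st.2.isEmpty then st else (st.1 ++ [st.2], []))
        else (st.1, st.2 ++ [line])) ([], cur))
      = pvTakeBlock cur ++ pvProc (cur.any pvIsHeader) lines := by
  induction lines generalizing cur with
  | nil =>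
    simp only [List.foldl_nil, pvFinish, pvProc]
    by_cases hc : cur.isEmpty
    · rw [List.isEmpty_iff] at hc; simp [hc, pvTakeBlock]
    · simp [hc]
  | cons l ls ih =>
    simp only [List.foldl_cons]
    by_cases hb : pvIsBlank l = true
    · have hh : pvIsHeader l = false := pv_blank_not_header l hb
      by_cases hc : cur.isEmpty
      · rw [List.isEmpty_iff] at hc
        subst hc
        simp only [hb, if_true, List.isEmpty_nil, if_true]
        rw [ih []]
        simp [pvTakeBlock, pvProc, hh, hb]
      · simp only [hb, if_true, hc, Bool.false_eq_true, if_false, List.nil_append]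
        rw [pv_foldB_acc ls [cur] []]
        rw [pv_finish_acc [cur] _]
        rw [ih []]
        simp [pvTakeBlock, pvProc, hh, hb]
    · rw [Bool.not_eq_true] at hb
      simp only [hb, Bool.false_eq_true, if_false]
      rw [ih (cur ++ [l])]
      rw [pv_takeBlock_append cur [l], List.any_append]
      by_cases hh : pvIsHeader l = true
      · by_cases ha : cur.any pvIsHeader = true
        · simp [pvProc, hh, ha]
        · rw [Bool.not_eq_true] at ha
          rw [pv_takeBlock_eq_map cur ha]
          simp [pvProc, pvTakeBlock, hh, ha]
      · rw [Bool.not_eq_true] at hh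
        by_cases ha : cur.any pvIsHeader = true
        · simp [pvProc, pvTakeBlock, hh, hb, ha]
        · rw [Bool.not_eq_true] at ha
          rw [pv_takeBlock_eq_map cur ha]
          simp [pvProc, pvTakeBlock, hh, hb, ha]

-- B's output loop is a flatMap
lemma pv_out_eq (blocks : List (List String)) (acc : List String) :
    blocks.foldl (fun out block => out ++ pvTakeBlock block) acc = acc ++ blocks.flatMap pvTakeBlock := by
  induction blocks generalizing acc with
  | nil => simp
  | cons b bs ih => simp [ih, List.append_assoc]

-- ===== VERDICT (by name: the statement is the Claim_ definition above) =====
theorem process_email_thread_spec : Claim_equal_process_email_thread := by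
  intro email_content _
  simp only [Spec_process_email_thread, process_email_thread, process_email_thread_alt]
  rw [pv_foldA, pv_out_eq]
  rw [show ∀ st : List (List String) × List String,
        (if st.2.isEmpty then st.1 else st.1 ++ [st.2]).flatMap pvTakeBlock = pvFinish st
      from fun _ => rfl]
  rw [pv_mainB _ []]
  simp [pvTakeBlock]
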